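-- pv_equiv track=rewrite | github.com/skyoxu/wowguaji | scripts/python/normalize_overlays.py | ensure_fixed_tags
-- ===== SOURCE A (Python) =====
-- FIXED_TAGS: set[str] = {
--     "t2",
--     "overview",
--     "core_loop",
--     "gathering",
--     "crafting",
--     "combat",
--     "regions_map",
--     "save_offline",
--     "dlc",
--     "ui_dashboard",
--     "index",
--     "checklist",
-- }
--
-- def ensure_fixed_tags(tags: list[str]) -> list[str]:
--     out = []
--     for t in tags:
--         if t not in FIXED_TAGS:
--             raise ValueError(f"Tag not in fixed set: {t}")
--         if t not in out:
--             out.append(t)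
--     return out
-- ===== SOURCE B (Python) =====
-- FIXED_TAGS: set[str] = {
--     "t2",
--     "overview",
--     "core_loop",
--     "gathering",
--     "crafting",
--     "combat",
--     "regions_map",
--     "save_offline",
--     "dlc",
--     "ui_dashboard",
--     "index",
--     "checklist",
-- }
--
-- def ensure_fixed_tags(tags: list[str]) -> list[str]:
--     bad = [t for t in tags if t not in FIXED_TAGS]
--     if bad:
--         raise ValueError(f"Tag not in fixed set: {bad[0]}")
--     return [t for i, t in enumerate(tags) if t not in tags[:i]]
-- ===== Notes on version B (the rewrite author's own statement) =====
-- stated objective: alternative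
-- what changed: A's single stateful loop that validates and appends to an accumulator (checking 't not in out') is replaced by two stateless comprehensions: a filter collecting all invalid tags (raising on the first), then a first-occurrence filter that keeps tags[i] iff it does not occur in the input prefix tags[:i] - no output accumulator is maintained at all.
import Mathlib
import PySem

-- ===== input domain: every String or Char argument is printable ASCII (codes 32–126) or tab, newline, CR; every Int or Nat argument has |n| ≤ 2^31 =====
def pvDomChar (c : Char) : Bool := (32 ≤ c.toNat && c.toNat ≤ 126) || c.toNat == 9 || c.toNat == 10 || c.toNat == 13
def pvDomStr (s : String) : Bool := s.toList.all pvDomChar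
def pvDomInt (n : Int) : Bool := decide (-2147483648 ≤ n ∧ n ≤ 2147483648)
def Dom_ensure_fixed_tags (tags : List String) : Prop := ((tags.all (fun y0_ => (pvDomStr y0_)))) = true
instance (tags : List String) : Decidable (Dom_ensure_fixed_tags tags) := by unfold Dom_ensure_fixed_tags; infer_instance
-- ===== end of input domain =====

-- B replaces A's single stateful validate-and-accumulate loop by two stateless comprehensions:
-- a filter collecting invalid tags, then a first-occurrence filter keeping tags[i] iff it is
-- absent from the prefix tags[:i] (no output accumulator is maintained).

-- ===== PORT A =====
def fixedTags : List String :=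
  ["t2", "overview", "core_loop", "gathering", "crafting", "combat",
   "regions_map", "save_offline", "dlc", "ui_dashboard", "index", "checklist"]

-- A's loop: `none` = the ValueError path (excluded by Pre_).
def ensureLoopA (out : List String) : List String → Option (List String)
  | [] => some out
  | t :: ts =>
    if fixedTags.contains t then
      (if out.contains t then ensureLoopA out ts else ensureLoopA (out ++ [t]) ts)
    else none

def ensure_fixed_tags (tags : List String) : List String :=
  (ensureLoopA [] tags).getD []

-- ===== PORT B =====
-- B's `bad = [t for t in tags if t not in FIXED_TAGS]`
def badTagsB (tags : List String) : List String :=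
  tags.filter (fun t => !(fixedTags.contains t))

-- B: if bad is nonempty, raise (the `[]` branch is excluded by Pre_); otherwise the
-- first-occurrence comprehension `[t for i, t in enumerate(tags) if t not in tags[:i]]`.
def ensure_fixed_tags_alt (tags : List String) : List String :=
  if badTagsB tags = [] then
    ((PySem.List.enumerate tags).filter
      (fun p => !(PySem.List.slice tags none (some p.1)).contains p.2)).map (·.2)
  else []

-- ===== PRECONDITION & SPEC =====
-- Pre_: every tag is in the fixed set — exactly where A's Python returns instead of raising ValueError.
def Pre_ensure_fixed_tags (tags : List String) : Prop :=
  ∀ t ∈ tags, fixedTags.contains t = true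
instance (tags : List String) : Decidable (Pre_ensure_fixed_tags tags) := by
  unfold Pre_ensure_fixed_tags; infer_instance

def pvWitness_ensure_fixed_tags : List String := ["t2", "dlc", "t2", "index"]

def Spec_ensure_fixed_tags (tags : List String) (out : List String) : Prop := out = ensure_fixed_tags_alt tags
instance (tags : List String) (out : List String) : Decidable (Spec_ensure_fixed_tags tags out) := by
  unfold Spec_ensure_fixed_tags; infer_instance

-- ===== CLAIM (what is proved, stated in full; the proofs are below) =====
def Claim_equal_ensure_fixed_tags : Prop := ∀ (tags : List String), Dom_ensure_fixed_tags tags → Pre_ensure_fixed_tags tags → Spec_ensure_fixed_tags tags (ensure_fixed_tags tags)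

-- ===== LEMMAS AND PROOFS =====

-- Under Pre_, A's loop never raises and is the Set.add fold.
lemma ensureLoopA_eq (ts : List String) :
    ∀ out, (∀ t ∈ ts, fixedTags.contains t = true) →
      ensureLoopA out ts = some (ts.foldl PySem.Set.add out) := by
  induction ts with
  | nil => intro out _; simp [ensureLoopA]
  | cons t ts ih =>
    intro out h
    have ht : fixedTags.contains t = true := h t (List.mem_cons_self ..)
    have hrest : ∀ u ∈ ts, fixedTags.contains u = true := fun u hu => h u (List.mem_cons_of_mem _ hu)
    simp only [ensureLoopA, ht, if_true, List.foldl_cons, PySem.Set.add]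
    by_cases hc : t ∈ out
    · simp [hc, ih out hrest]
    · simp [hc, ih (out ++ [t]) hrest]

-- A's accumulator fold equals B's first-occurrence filter, generalized over an already
-- consumed prefix `pre` whose element set the accumulator `out` carries.
lemma foldl_add_eq_firstOcc (ts : List String) :
    ∀ (pre out : List String), (∀ x, x ∈ out ↔ x ∈ pre) →
      ts.foldl PySem.Set.add out =
        out ++ ((PySem.List.enumerate ts (pre.length : Int)).filter
          (fun p => !((pre ++ ts).take p.1.toNat).contains p.2)).map (·.2) := by
  induction ts with
  | nil => intro pre out _; simp [PySem.List.enumerate_nil]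
  | cons t ts ih =>
    intro pre out hmem
    have htake : (pre ++ t :: ts).take pre.length = pre := by
      simp
    have hassoc : pre ++ t :: ts = (pre ++ [t]) ++ ts := by simp
    have hlen : ((pre ++ [t]).length : Int) = (pre.length : Int) + 1 := by
      simp
    rw [PySem.List.enumerate_cons, List.foldl_cons]
    simp only [List.filter_cons]
    have htoNat : ((pre.length : Int)).toNat = pre.length := by simp
    by_cases hc : t ∈ out
    · have hpre : t ∈ pre := (hmem t).1 hc
      have hcond : (!((pre ++ t :: ts).take ((pre.length : Int)).toNat).contains t) = false := by
        simp [htoNat, htake, hpre]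
      rw [hcond]
      simp only [Bool.false_eq_true, if_false]
      have hmem' : ∀ x, x ∈ out ↔ x ∈ pre ++ [t] := by
        intro x
        constructor
        · intro hx; exact List.mem_append_left _ ((hmem x).1 hx)
        · intro hx
          rcases List.mem_append.1 hx with h | h
          · exact (hmem x).2 h
          · simp at h; subst h; exact hc
      have hadd : PySem.Set.add out t = out := by simp [PySem.Set.add, hc]
      rw [hadd, ih (pre ++ [t]) out hmem', hlen, ← hassoc]
    · have hpre : t ∉ pre := fun h => hc ((hmem t).2 h)
      have hcond : (!((pre ++ t :: ts).take ((pre.length : Int)).toNat).contains t) = true := by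
        simp [htoNat, htake, hpre]
      rw [hcond, if_pos rfl]
      have hmem' : ∀ x, x ∈ out ++ [t] ↔ x ∈ pre ++ [t] := by
        intro x; simp [hmem x]
      have hadd : PySem.Set.add out t = out ++ [t] := by simp [PySem.Set.add, hc]
      rw [hadd, ih (pre ++ [t]) (out ++ [t]) hmem', hlen, ← hassoc]
      simp

-- The Int slice bound in B's port is a nonnegative enumerate index, so slice = take.
lemma filter_slice_eq_filter_take (tags : List String) :
    ((PySem.List.enumerate tags).filter
        (fun p => !(PySem.List.slice tags none (some p.1)).contains p.2)) =
      ((PySem.List.enumerate tags (0 : Int)).filter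
        (fun p => !(tags.take p.1.toNat).contains p.2)) := by
  apply List.filter_congr
  intro p hp
  rcases (PySem.List.mem_enumerate_iff _ _ _).1 hp with ⟨k, hk, rfl⟩
  rw [PySem.List.slice_to]
  simp

lemma badTags_nil_of_pre (ts : List String) (h : ∀ t ∈ ts, fixedTags.contains t = true) :
    badTagsB ts = [] := by
  simp only [badTagsB, List.filter_eq_nil_iff]
  intro t ht; simpa using h t ht

-- ===== VERDICT (by name: the statement is the Claim_ definition above) =====
theorem ensure_fixed_tags_spec : Claim_equal_ensure_fixed_tags := by
  intro tags _ hpre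
  unfold Spec_ensure_fixed_tags ensure_fixed_tags ensure_fixed_tags_alt
  rw [ensureLoopA_eq tags [] hpre, badTags_nil_of_pre tags hpre, if_pos rfl,
    filter_slice_eq_filter_take]
  have := foldl_add_eq_firstOcc tags [] [] (by simp)
  simp at this
  simpa using this
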